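-- pv_equiv track=rewrite | github.com/Dal-Opez/Course_Work_3 | course_work_3/operation.py | convert_card
-- ===== SOURCE A (Python) =====
-- def convert_card(account_data: str):
--     """
--     ФУнкция принимает информацию о карте и возвращает ее зашифрованный вариант
--     Excample: "Maestro 1596837868705199" -> "Maestro 1596 83** **** 5199"
--     :param account_data: информация о карте
--     :return: возвращает зашифрованную информацию о карте
--     """
--     number = []
--     name = []
--     new_number = []
--     for i in range(len(account_data)):
--         if account_data[i].isdigit():
--             number.append(account_data[i])
--         else:
--             name.append(account_data[i])
--     for i in range(6, len(number) - 4):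
--         number[i] = "*"
--     for i in range(len(number)):
--         if i % 4 == 0 and i != 0:
--             new_number.append(' ')
--         new_number.append(number[i])
--     return ''.join(name + new_number)
-- ===== SOURCE B (Python) =====
-- def convert_card(account_data: str):
--     """Same masking/grouping, built by filtering, a single enumerate pass, and chunked joining."""
--     name = ''.join(c for c in account_data if not c.isdigit())
--     digits = [c for c in account_data if c.isdigit()]
--     n = len(digits)
--     masked = ''.join('*' if 6 <= i < n - 4 else d for i, d in enumerate(digits))
--     parts = []
--     rest = masked
--     while rest:
--         parts.append(rest[:4])
--         rest = rest[4:]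
--     return name + ' '.join(parts)
-- ===== Notes on version B (the rewrite author's own statement) =====
-- stated objective: idiomatic
-- what changed: Replaces A's three index loops (character partition by index, in-place star assignment over range(6, len-4), and a space-insertion loop keyed on i % 4) with filters, a single enumerate pass building the masked string, and a chunk-of-4 slice-and-join for the grouping.
import Mathlib
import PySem

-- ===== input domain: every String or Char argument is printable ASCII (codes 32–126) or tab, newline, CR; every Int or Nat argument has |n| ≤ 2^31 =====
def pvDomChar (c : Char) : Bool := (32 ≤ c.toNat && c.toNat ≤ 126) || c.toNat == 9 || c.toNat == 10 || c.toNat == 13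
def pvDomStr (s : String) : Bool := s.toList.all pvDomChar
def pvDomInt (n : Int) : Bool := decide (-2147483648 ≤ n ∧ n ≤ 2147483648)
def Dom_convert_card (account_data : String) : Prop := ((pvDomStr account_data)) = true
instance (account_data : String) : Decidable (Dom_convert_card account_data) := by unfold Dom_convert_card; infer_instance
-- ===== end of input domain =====

-- B replaces A's index loops by a filter, one enumerate pass for the mask, and a chunk-and-join
-- for the grouping (objective: idiomatic; same cost).

-- ===== PORT A =====
-- Python per-char str.isdigit: on the ASCII domain it is exactly Char.isDigit.
-- range(6, len-4) yields only indices ≥ 6, so i.toNat is exact.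
def convert_card (account_data : String) : String :=
  let cs := account_data.toList
  let p := cs.foldl (fun (p : List Char × List Char) c =>
      if c.isDigit then (p.1 ++ [c], p.2) else (p.1, p.2 ++ [c])) (([], []) : List Char × List Char)
  let number := (PySem.List.pyRange 6 ((p.1.length : Int) - 4) 1).foldl
      (fun acc i => acc.set i.toNat '*') p.1
  let newNumber := (PySem.List.pyRange 0 (number.length : Int) 1).foldl
      (fun acc i => (if PySem.Int.mod i 4 == 0 && i != 0 then acc ++ [' '] else acc)
                    ++ [PySem.List.pyGetD number i ' ']) ([] : List Char)
  String.ofList (p.2 ++ newNumber)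

-- ===== PORT B =====
-- Source B's while loop over 'rest', peeling rest[:4] / rest[4:], as structural recursion.
def pvChunk4 : List Char → List (List Char)
  | [] => []
  | c :: rest => ((c :: rest).take 4) :: pvChunk4 ((c :: rest).drop 4)
  termination_by l => l.length
  decreasing_by simp

def convert_card_alt (account_data : String) : String :=
  let cs := account_data.toList
  let name := cs.filter (fun c => !c.isDigit)
  let digits := cs.filter (fun c => c.isDigit)
  let masked := (PySem.List.enumerate digits).map
      (fun q => if 6 ≤ q.1 ∧ q.1 < (digits.length : Int) - 4 then '*' else q.2)
  String.ofList (name ++ List.intercalate [' '] (pvChunk4 masked))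

-- ===== PRECONDITION & SPEC =====
def Spec_convert_card (account_data : String) (out : String) : Prop := out = convert_card_alt account_data
instance (account_data : String) (out : String) : Decidable (Spec_convert_card account_data out) := by unfold Spec_convert_card; infer_instance

-- ===== CLAIM (what is proved, stated in full; the proofs are below) =====
def Claim_equal_convert_card : Prop := ∀ (account_data : String), Dom_convert_card account_data → Spec_convert_card account_data (convert_card account_data)

-- ===== LEMMAS AND PROOFS =====

-- A's first loop is the pair of filters.
lemma pv_part (cs : List Char) (a b : List Char) :
    cs.foldl (fun (p : List Char × List Char) c =>
      if c.isDigit then (p.1 ++ [c], p.2) else (p.1, p.2 ++ [c])) (a, b)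
    = (a ++ cs.filter (fun c => c.isDigit), b ++ cs.filter (fun c => !c.isDigit)) := by
  induction cs generalizing a b with
  | nil => simp
  | cons c cs ih => by_cases h : c.isDigit <;> simp [h, ih]

-- getElem? through A's masking fold.
lemma pv_foldl_set_getElem? (is : List Int) (l : List Char) (j : Nat)
    (hnn : ∀ i ∈ is, 0 ≤ i) :
    ((is.foldl (fun acc i => acc.set i.toNat '*') l))[j]? =
      if ((j : Int) ∈ is ∧ j < l.length) then some '*' else l[j]? := by
  induction is generalizing l with
  | nil => simp
  | cons i is ih =>
    have h0 : 0 ≤ i := hnn i (by simp)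
    rw [List.foldl_cons, ih _ (fun x hx => hnn x (by simp [hx]))]
    simp only [List.getElem?_set, List.length_set, List.mem_cons]
    by_cases hlt : j < l.length
    · by_cases hm : (j : Int) ∈ is
      · simp [hm, hlt]
      · by_cases hji : (j : Int) = i
        · have hieq : i.toNat = j := by omega
          simp [hji, hieq, hlt]
        · have hieq : ¬ i.toNat = j := by omega
          simp [hm, hji, hieq]
    · have hnone : l[j]? = none := by rw [List.getElem?_eq_none_iff]; omega
      by_cases hieq : i.toNat = j
      · have hilt : ¬ i.toNat < l.length := by omega
        simp [hieq, hlt]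
      · simp [hieq, hlt]

-- B's enumerate-map as mapIdx.
lemma pv_enum_map (f : Int × Char → Char) (l : List Char) (s : Int) :
    (PySem.List.enumerate l s).map f = List.mapIdx (fun i d => f (s + (i : Int), d)) l := by
  induction l generalizing s with
  | nil => simp [PySem.List.enumerate]
  | cons c l ih =>
    simp only [PySem.List.enumerate_cons, List.map_cons, List.mapIdx_cons, ih]
    congr 1
    · norm_num
    · congr 1; funext i d; congr 2; push_cast; ring

-- the masking stage: A's in-place loop equals B's one-pass map.
lemma pv_mask (l : List Char) :
    (PySem.List.pyRange 6 ((l.length : Int) - 4) 1).foldl (fun acc i => acc.set i.toNat '*') l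
    = (PySem.List.enumerate l).map
        (fun q => if 6 ≤ q.1 ∧ q.1 < (l.length : Int) - 4 then '*' else q.2) := by
  rw [pv_enum_map]
  apply List.ext_getElem?
  intro j
  rw [pv_foldl_set_getElem? _ _ _ (fun i hi => by
        rw [PySem.List.mem_pyRange_one] at hi; omega)]
  rw [List.getElem?_mapIdx]
  by_cases hlt : j < l.length
  · simp only [PySem.List.mem_pyRange_one, List.getElem?_eq_getElem hlt, Option.map_some]
    split_ifs with h1 h2 <;> first | rfl | (exfalso; omega)
  · have hnone : l[j]? = none := by rw [List.getElem?_eq_none_iff]; omega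
    simp [hlt, PySem.List.mem_pyRange_one]

-- enumeration pairs read back through pyGetD.
lemma pv_mem_enum (l : List Char) (s : Int) :
    ∀ q ∈ PySem.List.enumerate l s,
      s ≤ q.1 ∧ q.1 < s + l.length ∧ l[(q.1 - s).toNat]? = some q.2 := by
  induction l generalizing s with
  | nil => simp [PySem.List.enumerate]
  | cons c l ih =>
    intro q hq
    rw [PySem.List.enumerate_cons] at hq
    rcases List.mem_cons.mp hq with h | h
    · subst h; refine ⟨le_refl _, by simp, ?_⟩; simp
    · obtain ⟨h1, h2, h3⟩ := ih (s + 1) q h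
      refine ⟨by omega, by simp; omega, ?_⟩
      have ht : (q.1 - s).toNat = (q.1 - (s + 1)).toNat + 1 := by omega
      rw [ht, List.getElem?_cons_succ]
      exact h3

-- the piece emitted for index i holding char c
def pvG (q : Int × Char) : List Char :=
  if PySem.Int.mod q.1 4 == 0 && q.1 != 0 then [' ', q.2] else [q.2]

lemma pvG_of_not (q : Int × Char) (h : ¬(PySem.Int.mod q.1 4 = 0 ∧ q.1 ≠ 0)) : pvG q = [q.2] := by
  unfold pvG
  split_ifs with hb
  · exfalso; apply h; simpa using hb
  · rfl

-- a run of indices none of which starts a later group contributes the chars unchanged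
lemma pv_flat_within (t : List Char) : ∀ (s : Int),
    (∀ k : Nat, k < t.length → ¬(PySem.Int.mod (s + k) 4 = 0 ∧ s + (k : Int) ≠ 0)) →
    (PySem.List.enumerate t s).flatMap pvG = t := by
  induction t with
  | nil => simp [PySem.List.enumerate]
  | cons c t ih =>
    intro s h
    rw [PySem.List.enumerate_cons, List.flatMap_cons]
    rw [pvG_of_not _ (by have := h 0 (by simp); simpa using this)]
    rw [ih (s + 1) (fun k hk => by
      have := h (k + 1) (by simp; omega)
      push_cast at this ⊢
      convert this using 3 <;> ring_nf)]
    rfl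

lemma pv_intercalate_cons (x : List Char) (xs : List (List Char)) :
    List.intercalate [' '] (x :: xs) = x ++ xs.flatMap (fun ch => ' ' :: ch) := by
  induction xs generalizing x with
  | nil => simp [List.intercalate]
  | cons y ys ih =>
    have h2 : List.intercalate [' '] (x :: y :: ys) = x ++ [' '] ++ List.intercalate [' '] (y :: ys) := by
      simp [List.intercalate]
    rw [h2, ih y]
    simp

lemma pv_mod4_emod (i : Int) : PySem.Int.mod i 4 = i % 4 :=
  PySem.Int.mod_eq_emod_of_pos (by norm_num)

-- chunks after the first each contribute a space then their chars
lemma pv_groupS : ∀ (n : Nat) (l : List Char), l.length ≤ n → ∀ (s : Int), 4 ≤ s → s % 4 = 0 →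
    (PySem.List.enumerate l s).flatMap pvG = (pvChunk4 l).flatMap (fun ch => ' ' :: ch) := by
  intro n
  induction n with
  | zero =>
    intro l hl
    have : l = [] := List.eq_nil_of_length_eq_zero (by omega)
    subst this
    simp [PySem.List.enumerate, pvChunk4.eq_1]
  | succ m ih =>
    intro l hl s hs hm
    cases l with
    | nil => simp [PySem.List.enumerate, pvChunk4.eq_1]
    | cons c rest =>
      rw [pvChunk4.eq_2]
      have hsplit : (c :: rest) = (c :: rest).take 4 ++ (c :: rest).drop 4 := by simp
      conv_lhs => rw [hsplit]
      rw [PySem.List.enumerate_append, List.flatMap_append]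
      have htk : (c :: rest).take 4 = c :: rest.take 3 := by simp
      rw [htk, PySem.List.enumerate_cons, List.flatMap_cons]
      have hlen3 : (rest.take 3).length ≤ 3 := by simp
      rw [pv_flat_within (rest.take 3) (s + 1) (fun k hk => by
        rw [pv_mod4_emod]; omega)]
      have hG : pvG (s, c) = [' ', c] := by
        unfold pvG
        have hb : (PySem.Int.mod s 4 == 0 && s != 0) = true := by
          rw [pv_mod4_emod]; simp; omega
        rw [if_pos hb]
      rw [hG]
      by_cases hlong : 4 ≤ (c :: rest).length
      · have hl4 : (c :: rest.take 3).length = 4 := by simp at hlong ⊢; omega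
        rw [hl4]
        simp only [Nat.cast_ofNat]
        rw [ih ((c :: rest).drop 4)
            (by simp only [List.length_drop, List.length_cons] at hl ⊢; omega)
            (s + 4) (by omega) (by omega)]
        simp
      · have hdrop : (c :: rest).drop 4 = [] := by
          apply List.drop_eq_nil_of_le; omega
        rw [hdrop]
        simp [PySem.List.enumerate, pvChunk4.eq_1]

-- the grouping stage: A's space-insertion loop equals B's chunk-and-join.
lemma pv_group (l : List Char) :
    (PySem.List.pyRange 0 (l.length : Int) 1).foldl
      (fun acc i => (if PySem.Int.mod i 4 == 0 && i != 0 then acc ++ [' '] else acc)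
                    ++ [PySem.List.pyGetD l i ' ']) ([] : List Char)
    = List.intercalate [' '] (pvChunk4 l) := by
  have hrange : PySem.List.pyRange 0 (l.length : Int) 1
      = (PySem.List.enumerate l).map (fun q => q.1) := by
    rw [PySem.List.map_fst_enumerate]; norm_num
  rw [hrange, List.foldl_map]
  rw [PySem.List.foldl_congr_mem _ _
      (fun acc q => acc ++ pvG q) _ (fun acc q hq => by
        obtain ⟨h1, h2, h3⟩ := pv_mem_enum l 0 q hq
        simp only [sub_zero] at h3
        have hb : q.1.toNat < l.length := by omega
        have hget : PySem.List.pyGetD l q.1 ' ' = q.2 := by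
          rw [PySem.List.pyGetD_eq_getElem l ' ' h1 (by omega)]
          rw [List.getElem?_eq_getElem hb] at h3
          exact Option.some.inj h3
        rw [hget]
        cases hcond : (PySem.Int.mod q.1 4 == 0 && q.1 != 0) <;>
          simp only [pvG, hcond] <;> simp)]
  rw [PySem.List.foldl_append_eq_flatMap, List.nil_append]
  cases l with
  | nil => simp [PySem.List.enumerate, pvChunk4.eq_1, List.intercalate]
  | cons c rest =>
    rw [pvChunk4.eq_2, pv_intercalate_cons]
    have hsplit : (c :: rest) = (c :: rest).take 4 ++ (c :: rest).drop 4 := by simp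
    conv_lhs => rw [hsplit]
    rw [PySem.List.enumerate_append, List.flatMap_append]
    have htk : (c :: rest).take 4 = c :: rest.take 3 := by simp
    rw [htk, PySem.List.enumerate_cons, List.flatMap_cons]
    simp only [zero_add]
    have hG : pvG (0, c) = [c] := by unfold pvG; simp
    rw [hG]
    have hlen3 : (rest.take 3).length ≤ 3 := by simp
    rw [pv_flat_within (rest.take 3) 1 (fun k hk => by rw [pv_mod4_emod]; omega)]
    by_cases hlong : 4 ≤ (c :: rest).length
    · have hl4 : (c :: rest.take 3).length = 4 := by simp at hlong ⊢; omega
      rw [hl4]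
      simp only [Nat.cast_ofNat]
      rw [pv_groupS ((c :: rest).drop 4).length _ (le_refl _) 4 (by omega) (by omega)]
      simp
    · have hdrop : (c :: rest).drop 4 = [] := by apply List.drop_eq_nil_of_le; omega
      rw [hdrop]
      simp [PySem.List.enumerate, pvChunk4.eq_1]

-- ===== VERDICT (by name: the statement is the Claim_ definition above) =====
theorem convert_card_spec : Claim_equal_convert_card := by
  intro s _
  unfold Spec_convert_card convert_card convert_card_alt
  simp only []
  rw [pv_part s.toList [] []]
  simp only [List.nil_append]
  rw [pv_mask]
  rw [← pv_group]
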